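-- pv_equiv track=rewrite | github.com/jpurma/Kataja | kataja/plugins/mgtdbp/versions/mgtdbp-devA.py | getMover
-- ===== SOURCE A (Python) =====
-- def getMover(f, moverFeatureLists):
--     mover = []
--     remainder = []
--     for moverFeatureList in moverFeatureLists:
--         if moverFeatureList[0][1] == f:
--             if not mover:  # OK if we did not already find an f
--                 mover = [moverFeatureList[1:]]  # put remainder into singleton list
--             else:  # if we find 2 f's, there is an SMC violation
--                 raise RuntimeError('SMC violation in move_check')
--         else:  # put others back into remainder list
--             remainder.extend(moverFeatureList)
--     if not mover:
--         raise RuntimeError('getMover error: no mover found')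
--     else:
--         return mover, remainder
-- ===== SOURCE B (Python) =====
-- def getMover(f, moverFeatureLists):
--     def go(lists):
--         if not lists:
--             raise RuntimeError('getMover error: no mover found')
--         head, tail = lists[0], lists[1:]
--         if head[0][1] == f:
--             for x in tail:
--                 if x[0][1] == f:
--                     raise RuntimeError('SMC violation in move_check')
--             return [head[1:]], [feat for x in tail for feat in x]
--         mover, remainder = go(tail)
--         return mover, list(head) + remainder
--     return go(moverFeatureLists)
-- ===== Notes on version B (the rewrite author's own statement) =====
-- stated objective: alternative
-- what changed: Replaces A's iterative scan with mutable mover/remainder accumulators and a 'mover already found' flag by a structural recursion that splits the list at the first match, checks the tail once for a second match (SMC), and assembles the remainder back-to-front on the way out of the recursion.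
import Mathlib
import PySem

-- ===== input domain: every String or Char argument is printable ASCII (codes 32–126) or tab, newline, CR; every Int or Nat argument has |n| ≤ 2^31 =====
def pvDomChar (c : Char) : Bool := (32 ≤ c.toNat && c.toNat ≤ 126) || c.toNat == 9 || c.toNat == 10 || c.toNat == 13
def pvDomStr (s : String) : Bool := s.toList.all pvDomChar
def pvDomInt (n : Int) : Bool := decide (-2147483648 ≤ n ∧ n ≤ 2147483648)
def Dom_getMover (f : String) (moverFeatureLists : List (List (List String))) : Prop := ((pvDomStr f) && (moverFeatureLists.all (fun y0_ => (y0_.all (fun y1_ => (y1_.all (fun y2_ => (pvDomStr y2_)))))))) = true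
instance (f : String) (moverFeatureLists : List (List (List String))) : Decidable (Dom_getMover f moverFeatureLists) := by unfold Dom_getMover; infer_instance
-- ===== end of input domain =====

-- B is a structurally different decomposition of the same task (recursion splitting at the
-- first match, remainder assembled back-to-front), not faster; equivalence proved on Pre_.

-- shared helper: moverFeatureList[0][1] (none = IndexError)
def pvFeat (m : List (List String)) : Option String :=
  (PySem.List.pyGet? m 0).bind (fun r => PySem.List.pyGet? r 1)

-- ===== PORT A =====
-- literal port of A's fused loop; 'none' marks the points where the Python raises
def getMoverLoop (f : String) : List (List (List String)) → List (List (List String)) → List (List String) → Option (List (List (List String)) × List (List String))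
  | [], mover, remainder => if mover = [] then none else some (mover, remainder)
  | m :: rest, mover, remainder =>
    match pvFeat m with
    | none => none                                   -- IndexError on m[0][1]
    | some x =>
      if x = f then
        if mover = [] then getMoverLoop f rest [PySem.List.slice m (some 1) none] remainder
        else none                                    -- SMC violation
      else getMoverLoop f rest mover (remainder ++ m)

def getMover (f : String) (moverFeatureLists : List (List (List String))) : List (List (List String)) × List (List String) :=
  (getMoverLoop f moverFeatureLists [] []).getD ([], [])

-- ===== PORT B =====
-- the inner 'for x in tail: …raise SMC…' check of B
def checkSMC (f : String) : List (List (List String)) → Option Unit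
  | [] => some ()
  | x :: rest =>
    match pvFeat x with
    | none => none                                   -- IndexError on x[0][1]
    | some v => if v = f then none else checkSMC f rest   -- SMC violation raise

-- B's recursive 'go': split at the first match, remainder built back-to-front on return
def goB (f : String) : List (List (List String)) → Option (List (List (List String)) × List (List String))
  | [] => none                                       -- 'no mover found' raise
  | head :: tail =>
    match pvFeat head with
    | none => none                                   -- IndexError on head[0][1]
    | some v =>
      if v = f then
        (checkSMC f tail).map (fun _ => ([PySem.List.slice head (some 1) none], tail.flatten))
      else
        (goB f tail).map (fun p => (p.1, head ++ p.2))

def getMover_alt (f : String) (moverFeatureLists : List (List (List String))) : List (List (List String)) × List (List String) :=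
  (goB f moverFeatureLists).getD ([], [])

-- ===== PRECONDITION & SPEC =====
-- Pre_ excludes exactly the inputs on which A raises: an IndexError from m[0][1]
-- (some list empty or its head shorter than 2) or not exactly one matching mover.
def Pre_getMover (f : String) (moverFeatureLists : List (List (List String))) : Prop :=
  (∀ m ∈ moverFeatureLists, (pvFeat m).isSome = true) ∧
  moverFeatureLists.countP (fun m => pvFeat m == some f) = 1
instance (f : String) (moverFeatureLists : List (List (List String))) : Decidable (Pre_getMover f moverFeatureLists) := by unfold Pre_getMover; infer_instance

def pvWitness_getMover : String × List (List (List String)) :=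
  ("f", [[["a", "g"], ["b"]], [["a", "f"], ["c", "d"]]])

def Spec_getMover (f : String) (moverFeatureLists : List (List (List String))) (out : List (List (List String)) × List (List String)) : Prop := out = getMover_alt f moverFeatureLists
instance (f : String) (moverFeatureLists : List (List (List String))) (out : List (List (List String)) × List (List String)) : Decidable (Spec_getMover f moverFeatureLists out) := by unfold Spec_getMover; infer_instance

-- ===== CLAIM (what is proved, stated in full; the proofs are below) =====
def Claim_equal_getMover : Prop := ∀ (f : String) (moverFeatureLists : List (List (List String))), Dom_getMover f moverFeatureLists → Pre_getMover f moverFeatureLists → Spec_getMover f moverFeatureLists (getMover f moverFeatureLists)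

-- ===== LEMMAS AND PROOFS =====

-- after A found the mover: no further match, everything flows into remainder
theorem getMoverLoop_after (f : String) (rest : List (List (List String))) :
    ∀ (mover : List (List (List String))) (remainder : List (List String)),
    mover ≠ [] →
    (∀ m ∈ rest, (pvFeat m).isSome = true) →
    (∀ m ∈ rest, ¬ pvFeat m = some f) →
    getMoverLoop f rest mover remainder = some (mover, remainder ++ rest.flatten) := by
  induction rest with
  | nil => intro mover remainder hm _ _; simp [getMoverLoop, hm]
  | cons m rest ih =>
    intro mover remainder hm hok hno
    obtain ⟨x, hx⟩ := Option.isSome_iff_exists.mp (hok m (by simp))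
    have hxne : x ≠ f := by intro he; exact hno m (by simp) (by rw [hx, he])
    rw [getMoverLoop, hx]
    simp only [if_neg hxne]
    rw [ih mover (remainder ++ m) hm (fun a ha => hok a (by simp [ha]))
      (fun a ha => hno a (by simp [ha]))]
    simp

-- with no match anywhere, B's SMC check returns cleanly
theorem checkSMC_clean (f : String) (rest : List (List (List String))) :
    (∀ m ∈ rest, (pvFeat m).isSome = true) →
    (∀ m ∈ rest, ¬ pvFeat m = some f) →
    checkSMC f rest = some () := by
  induction rest with
  | nil => intro _ _; rfl
  | cons m rest ih =>
    intro hok hno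
    obtain ⟨x, hx⟩ := Option.isSome_iff_exists.mp (hok m (by simp))
    have hxne : x ≠ f := by intro he; exact hno m (by simp) (by rw [hx, he])
    rw [checkSMC, hx]
    simp only [if_neg hxne]
    exact ih (fun a ha => hok a (by simp [ha])) (fun a ha => hno a (by simp [ha]))

-- main invariant: A's loop (with remainder accumulator) vs B's recursion (back-to-front)
theorem loop_eq_go (f : String) (lists : List (List (List String))) :
    ∀ (remainder : List (List String)),
    (∀ m ∈ lists, (pvFeat m).isSome = true) →
    lists.countP (fun m => pvFeat m == some f) = 1 →
    ∃ mv rem, goB f lists = some (mv, rem) ∧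
      getMoverLoop f lists [] remainder = some (mv, remainder ++ rem) := by
  induction lists with
  | nil => intro _ _ h; simp at h
  | cons m rest ih =>
    intro remainder hok hcnt
    obtain ⟨x, hx⟩ := Option.isSome_iff_exists.mp (hok m (by simp))
    by_cases hxf : x = f
    · -- m is the unique match
      have hm : (pvFeat m == some f) = true := by rw [hx, hxf]; simp
      have hrest : rest.countP (fun m => pvFeat m == some f) = 0 := by
        rw [List.countP_cons] at hcnt; simpa [hm] using hcnt
      have hno : ∀ a ∈ rest, ¬ pvFeat a = some f := by
        intro a ha he
        have := List.countP_eq_zero.mp hrest a ha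
        simp [he] at this
      refine ⟨[PySem.List.slice m (some 1) none], rest.flatten, ?_, ?_⟩
      · rw [goB, hx]
        simp only [if_pos hxf]
        rw [checkSMC_clean f rest (fun a ha => hok a (by simp [ha])) hno]
        rfl
      · rw [getMoverLoop, hx]
        simp only [if_pos hxf]
        exact getMoverLoop_after f rest _ remainder (by simp)
          (fun a ha => hok a (by simp [ha])) hno
    · -- m does not match: recurse, prepend m to the remainder on the way out
      have hm : (pvFeat m == some f) = false := by
        rw [hx]; simpa using fun h => hxf h
      have hrest : rest.countP (fun m => pvFeat m == some f) = 1 := by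
        simpa [List.countP_cons, hm] using hcnt
      obtain ⟨mv, rem, hgo, hloop⟩ := ih (remainder ++ m)
        (fun a ha => hok a (by simp [ha])) hrest
      refine ⟨mv, m ++ rem, ?_, ?_⟩
      · rw [goB, hx]; simp only [if_neg hxf]; rw [hgo]; rfl
      · rw [getMoverLoop, hx]; simp only [if_neg hxf]; rw [hloop]; simp

-- ===== VERDICT (by name: the statement is the Claim_ definition above) =====
theorem getMover_spec : Claim_equal_getMover := by
  intro f lists _ hpre
  obtain ⟨hok, hcnt⟩ := hpre
  obtain ⟨mv, rem, hgo, hloop⟩ := loop_eq_go f lists [] hok hcnt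
  show getMover f lists = getMover_alt f lists
  rw [getMover, getMover_alt, hgo, hloop]
  simp
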